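-- pv_equiv track=rewrite | github.com/Aliaskar01/ADS | Lab9/e.py | find_minimal_task_name
-- ===== SOURCE A (Python) =====
-- def find_minimal_task_name(s, k):
--     n = len(s)
--
--     lps = [0] * n
--     j = 0
--     for i in range(1, n):
--         while j > 0 and s[i] != s[j]:
--             j = lps[j - 1]
--         if s[i] == s[j]:
--             j += 1
--             lps[i] = j
--
--     overlap = lps[-1]
--     minimal_length = n + (k - 1) * (n - overlap)
--
--     return minimal_length
-- ===== SOURCE B (Python) =====
-- def find_minimal_task_name(s, k):
--     # Direct definition: overlap = length of the longest proper border of s,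
--     # found by scanning candidate lengths from n-1 downward.
--     n = len(s)
--     overlap = 0
--     for L in range(n - 1, 0, -1):
--         if s[:L] == s[n - L:]:
--             overlap = L
--             break
--     return n + (k - 1) * (n - overlap)
-- ===== Notes on version B (the rewrite author's own statement) =====
-- stated objective: simpler
-- what changed: Replaces the KMP prefix-function computation by a direct downward scan for the longest proper border (largest L<n with s[:L]==s[n-L:]); the formula n+(k-1)*(n-overlap) is unchanged.
import Mathlib
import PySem

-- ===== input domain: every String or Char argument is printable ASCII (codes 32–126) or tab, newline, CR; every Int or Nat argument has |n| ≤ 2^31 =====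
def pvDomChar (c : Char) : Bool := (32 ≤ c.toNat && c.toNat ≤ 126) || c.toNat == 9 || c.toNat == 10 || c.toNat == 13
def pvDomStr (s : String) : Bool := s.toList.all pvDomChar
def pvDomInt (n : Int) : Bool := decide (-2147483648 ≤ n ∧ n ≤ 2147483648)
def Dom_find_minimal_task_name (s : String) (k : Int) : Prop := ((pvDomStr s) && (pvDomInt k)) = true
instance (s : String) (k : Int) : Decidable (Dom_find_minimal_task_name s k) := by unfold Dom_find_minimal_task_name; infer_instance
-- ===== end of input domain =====

-- B replaces A's KMP prefix-function loop by a direct downward scan for the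
-- longest proper border (objective: simpler).  Return-value equivalence only;
-- neither program mutates its arguments.

-- ===== PORT A =====
-- The KMP inner `while j > 0 and s[i] != s[j]: j = lps[j-1]`.
-- `fuel` makes the recursion structural; called with fuel = j+1, which always
-- suffices because each step strictly decreases j (proved in the lemmas below).
def pvDescend (l : List Char) (lps : List Nat) (c : Char) : Nat → Nat → Nat
  | _, 0 => 0
  | j, fuel + 1 =>
    if 0 < j ∧ c ≠ l.getD j ' ' then pvDescend l lps c (lps.getD (j - 1) 0) fuel
    else j

-- The outer `for i in range(1, n)` loop of A, carrying (lps, j).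
def pvKmpGo (l : List Char) (n : Nat) (i : Nat) (lps : List Nat) (j : Nat) : List Nat :=
  if h : i < n then
    let c := l.getD i ' '
    let j1 := pvDescend l lps c j (j + 1)
    if c = l.getD j1 ' ' then pvKmpGo l n (i + 1) (lps.set i (j1 + 1)) (j1 + 1)
    else pvKmpGo l n (i + 1) lps j1
  else lps
termination_by n - i

def find_minimal_task_name (s : String) (k : Int) : Int :=
  let l := s.toList
  let n := l.length
  let lps := pvKmpGo l n 1 (List.replicate n 0) 0
  -- Python `lps[-1]` raises IndexError on the empty list; excluded by Pre_.
  let overlap : Nat := (PySem.List.pyGet? lps (-1)).getD 0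
  (n : Int) + (k - 1) * ((n : Int) - (overlap : Int))

-- ===== PORT B =====
-- `for L in range(n-1, 0, -1): if s[:L] == s[n-L:]: overlap = L; break`
def pvBScan (l : List Char) (n : Nat) : Nat → Nat
  | 0 => 0
  | L + 1 => if l.take (L + 1) = l.drop (n - (L + 1)) then L + 1 else pvBScan l n L

def find_minimal_task_name_alt (s : String) (k : Int) : Int :=
  let l := s.toList
  let n := l.length
  let overlap := pvBScan l n (n - 1)
  (n : Int) + (k - 1) * ((n : Int) - (overlap : Int))

-- ===== PRECONDITION & SPEC =====
-- A raises IndexError on the empty string (lps[-1] of an empty list); excluded.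
def Pre_find_minimal_task_name (s : String) (k : Int) : Prop := s ≠ ""
instance (s : String) (k : Int) : Decidable (Pre_find_minimal_task_name s k) := by
  unfold Pre_find_minimal_task_name; infer_instance

def pvWitness_find_minimal_task_name : String × Int := ("abab", 3)

def Spec_find_minimal_task_name (s : String) (k : Int) (out : Int) : Prop := out = find_minimal_task_name_alt s k
instance (s : String) (k : Int) (out : Int) : Decidable (Spec_find_minimal_task_name s k out) := by unfold Spec_find_minimal_task_name; infer_instance

-- ===== CLAIM (what is proved, stated in full; the proofs are below) =====
def Claim_equal_find_minimal_task_name : Prop := ∀ (s : String) (k : Int), Dom_find_minimal_task_name s k → Pre_find_minimal_task_name s k → Spec_find_minimal_task_name s k (find_minimal_task_name s k)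

-- ===== LEMMAS AND PROOFS =====

-- `t` is a proper border of `q`: the length-`t` prefix equals the length-`t` suffix.
def IsBd (q : List Char) (t : Nat) : Prop :=
  t < q.length ∧ q.take t = q.drop (q.length - t)

-- the value B computes: the longest proper border of `l`
def mxb (l : List Char) : Nat := pvBScan l l.length (l.length - 1)

theorem bScan_le (l : List Char) (n : Nat) : ∀ L, pvBScan l n L ≤ L := by
  intro L; induction L with
  | zero => simp [pvBScan]
  | succ L ih => simp only [pvBScan]; split <;> omega

theorem bScan_prop (l : List Char) : ∀ L,
    l.take (pvBScan l l.length L) = l.drop (l.length - pvBScan l l.length L) := by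
  intro L; induction L with
  | zero => simp [pvBScan]
  | succ L ih =>
    simp only [pvBScan]; split
    · assumption
    · exact ih

theorem bScan_max (l : List Char) : ∀ L t, t ≤ L →
    l.take t = l.drop (l.length - t) → t ≤ pvBScan l l.length L := by
  intro L; induction L with
  | zero => intro t h _; omega
  | succ L ih =>
    intro t ht hp
    simp only [pvBScan]; split
    · omega
    · rename_i hne
      rcases Nat.eq_or_lt_of_le ht with rfl | h
      · exact absurd hp hne
      · exact ih t (by omega) hp

theorem mxb_isBd {l : List Char} (h : l ≠ []) : IsBd l (mxb l) := by
  have hl : 0 < l.length := List.length_pos_of_ne_nil h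
  unfold mxb IsBd
  refine ⟨?_, bScan_prop l _⟩
  have := bScan_le l l.length (l.length - 1); omega

theorem mxb_lt {l : List Char} (h : l ≠ []) : mxb l < l.length :=
  (mxb_isBd h).1

theorem isBd_le_mxb {l : List Char} {t : Nat} (h : IsBd l t) : t ≤ mxb l := by
  unfold mxb
  exact bScan_max l (l.length - 1) t (by have := h.1; omega) h.2

-- a smaller border is a border of the prefix cut at a larger border
theorem isBd_take {q : List Char} {u t : Nat} (hu : IsBd q u) (ht : IsBd q t)
    (htu : t < u) : IsBd (q.take u) t := by
  obtain ⟨hu1, hu2⟩ := hu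
  obtain ⟨ht1, ht2⟩ := ht
  have hlen : (q.take u).length = u := by simp; omega
  rw [IsBd, hlen]
  refine ⟨htu, ?_⟩
  have h1 : (q.take u).take t = q.take t := by
    rw [List.take_take]; congr 1; omega
  have h2 : (q.take u).drop (u - t) = q.drop (q.length - t) := by
    rw [hu2, List.drop_drop]; congr 1; omega
  rw [h1, ht2, ← h2]

-- border of a border is a border
theorem isBd_trans {q : List Char} {j t : Nat} (hj : IsBd q j)
    (ht : IsBd (q.take j) t) : IsBd q t := by
  obtain ⟨hj1, hj2⟩ := hj
  obtain ⟨ht1, ht2⟩ := ht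
  have hlen : (q.take j).length = j := by simp; omega
  rw [hlen] at ht1 ht2
  refine ⟨by omega, ?_⟩
  have h1 : (q.take j).take t = q.take t := by
    rw [List.take_take]; congr 1; omega
  have h2 : (q.take j).drop (j - t) = q.drop (q.length - t) := by
    rw [hj2, List.drop_drop]; congr 1; omega
  rw [← h1, ht2, h2]

-- positive borders of q ++ [c] come from matching borders of q
theorem isBd_snoc_succ {q : List Char} {c : Char} {t : Nat} :
    IsBd (q ++ [c]) (t + 1) ↔ IsBd q t ∧ q.getD t ' ' = c := by
  unfold IsBd
  simp only [List.length_append, List.length_singleton]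
  constructor
  · rintro ⟨h1, h2⟩
    have ht : t < q.length := by omega
    rw [show q.length + 1 - (t + 1) = q.length - t by omega] at h2
    rw [List.take_append_of_le_length (by omega),
        List.drop_append_of_le_length (by omega)] at h2
    rw [List.take_add_one, List.getElem?_eq_getElem ht] at h2
    simp only [Option.toList_some] at h2
    have hlen : (q.take t).length = (q.drop (q.length - t)).length := by
      simp [List.length_take, List.length_drop]; omega
    obtain ⟨e1, e2⟩ := List.append_inj h2 hlen
    have e2' : q[t] = c := by simpa using e2
    exact ⟨⟨ht, e1⟩, by simp [List.getD, List.getElem?_eq_getElem ht, e2']⟩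
  · rintro ⟨⟨ht, hb⟩, hc⟩
    refine ⟨by omega, ?_⟩
    rw [show q.length + 1 - (t + 1) = q.length - t by omega]
    rw [List.take_append_of_le_length (by omega),
        List.drop_append_of_le_length (by omega)]
    rw [List.take_add_one, List.getElem?_eq_getElem ht]
    simp only [Option.toList_some]
    have hqt : q[t] = c := by
      simpa [List.getD, List.getElem?_eq_getElem ht] using hc
    rw [hb, hqt]

theorem getD_take {l : List Char} {i j : Nat} (h : j < i) (d : Char) :
    (l.take i).getD j d = l.getD j d := by
  simp [List.getD, h]

theorem mxb_snoc {q : List Char} {c : Char} (d : Nat)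
    (hd : IsBd q d) (h0 : d = 0 ∨ q.getD d ' ' = c)
    (hmax : ∀ t, IsBd q t → q.getD t ' ' = c → t ≤ d) :
    mxb (q ++ [c]) = if q.getD d ' ' = c then d + 1 else 0 := by
  have hne : q ++ [c] ≠ [] := by simp
  split
  · rename_i hc
    have hmem : IsBd (q ++ [c]) (d + 1) := isBd_snoc_succ.mpr ⟨hd, hc⟩
    have hle : d + 1 ≤ mxb (q ++ [c]) := isBd_le_mxb hmem
    have hbd := mxb_isBd hne
    rcases Nat.eq_zero_or_pos (mxb (q ++ [c])) with h | h
    · omega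
    · obtain ⟨t, ht⟩ : ∃ t, mxb (q ++ [c]) = t + 1 := ⟨mxb (q ++ [c]) - 1, by omega⟩
      rw [ht] at hbd ⊢
      obtain ⟨hbt, hbc⟩ := isBd_snoc_succ.mp hbd
      have := hmax t hbt hbc
      omega
  · rename_i hc
    have hd0 : d = 0 := by tauto
    subst hd0
    have hbd := mxb_isBd hne
    rcases Nat.eq_zero_or_pos (mxb (q ++ [c])) with h | h
    · exact h
    · obtain ⟨t, ht⟩ : ∃ t, mxb (q ++ [c]) = t + 1 := ⟨mxb (q ++ [c]) - 1, by omega⟩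
      rw [ht] at hbd
      obtain ⟨hbt, hbc⟩ := isBd_snoc_succ.mp hbd
      have h0t : t = 0 := by have := hmax t hbt hbc; omega
      subst h0t
      exact absurd hbc hc

-- list.getD after set
theorem getD_set_self {lps : List Nat} {i v : Nat} (h : i < lps.length) :
    (lps.set i v).getD i 0 = v := by
  simp [List.getD, h]

theorem getD_set_ne {lps : List Nat} {i m v : Nat} (h : m ≠ i) :
    (lps.set i v).getD m 0 = lps.getD m 0 := by
  simp [List.getD, List.getElem?_set_ne (Ne.symm h)]

-- correctness of the fueled while-descend under the lps invariant:
-- it returns the largest border t of l.take i with character c after it (or 0)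
theorem descend_spec (l : List Char) (lps : List Nat) (i : Nat)
    (hin : i ≤ l.length)
    (hl : ∀ m, m < i → lps.getD m 0 = mxb (l.take (m + 1))) (c : Char) :
    ∀ j fuel, j < fuel → IsBd (l.take i) j →
      (∀ t, IsBd (l.take i) t → (l.take i).getD t ' ' = c → t ≤ j) →
      IsBd (l.take i) (pvDescend l lps c j fuel) ∧
      (pvDescend l lps c j fuel = 0 ∨ (l.take i).getD (pvDescend l lps c j fuel) ' ' = c) ∧
      (∀ t, IsBd (l.take i) t → (l.take i).getD t ' ' = c → t ≤ pvDescend l lps c j fuel) := by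
  intro j
  induction j using Nat.strong_induction_on with
  | _ j ih =>
    intro fuel hfuel hbd hub
    have hql : (l.take i).length = i := by simp; omega
    obtain ⟨f, rfl⟩ : ∃ f, fuel = f + 1 := ⟨fuel - 1, by omega⟩
    by_cases hcond : 0 < j ∧ c ≠ l.getD j ' '
    · rw [pvDescend, if_pos hcond]
      obtain ⟨hj0, hne⟩ := hcond
      have hjlt : j < i := by rw [← hql]; exact hbd.1
      have hstep : lps.getD (j - 1) 0 = mxb (l.take j) := by
        have := hl (j - 1) (by omega)
        rwa [show j - 1 + 1 = j by omega] at this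
      have hqt : l.take j = (l.take i).take j := by
        rw [List.take_take]; congr 1; omega
      have hlenj : ((l.take i).take j).length = j := by simp; omega
      have hqj : (l.take i).take j ≠ [] := by
        intro hnil; rw [hnil] at hlenj; simp at hlenj; omega
      have hnew : IsBd (l.take i) (mxb ((l.take i).take j)) :=
        isBd_trans hbd (mxb_isBd hqj)
      have hlt : mxb ((l.take i).take j) < j := by
        have := mxb_lt hqj; omega
      have hub' : ∀ t, IsBd (l.take i) t → (l.take i).getD t ' ' = c →
          t ≤ mxb ((l.take i).take j) := by
        intro t htb htc
        have hle := hub t htb htc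
        have htne : t ≠ j := by
          intro heq; subst heq
          rw [getD_take hjlt] at htc
          exact hne htc.symm
        exact isBd_le_mxb (isBd_take hbd htb (by omega))
      rw [hstep, hqt]
      exact ih _ hlt f (by omega) hnew hub'
    · rw [pvDescend, if_neg hcond]
      push Not at hcond
      refine ⟨hbd, ?_, hub⟩
      by_cases hj : j = 0
      · exact Or.inl hj
      · right
        have hjlt : j < i := by rw [← hql]; exact hbd.1
        rw [getD_take hjlt]
        exact (hcond (by omega)).symm

-- the main invariant of A's outer loop: on exit, lps[m] is the longest
-- proper border of l.take (m+1) for every m < l.length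
theorem kmpGo_spec (l : List Char) :
    ∀ fuel i lps j, l.length - i ≤ fuel → 1 ≤ i → i ≤ l.length → lps.length = l.length →
      (∀ m, m < i → lps.getD m 0 = mxb (l.take (m + 1))) →
      (∀ m, i ≤ m → lps.getD m 0 = 0) →
      j = mxb (l.take i) →
      ∀ m, m < l.length →
        (pvKmpGo l l.length i lps j).getD m 0 = mxb (l.take (m + 1)) := by
  intro fuel
  induction fuel with
  | zero =>
    intro i lps j hf h1 h2 _ hinv _ _ m hm
    rw [pvKmpGo, dif_neg (by omega)]
    exact hinv m (by omega)
  | succ f ihf =>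
    intro i lps j hf h1 h2 hlen hinv hzero hj m hm
    by_cases hi : i < l.length
    · rw [pvKmpGo, dif_pos hi]
      have hql : (l.take i).length = i := by simp; omega
      have hqne : l.take i ≠ [] := by
        intro hnil; rw [hnil] at hql; simp at hql; omega
      obtain ⟨hd1, hd2, hd3⟩ :=
        descend_spec l lps i (by omega) hinv (l.getD i ' ') j (j + 1) (by omega)
          (hj ▸ mxb_isBd hqne) (fun t ht _ => hj ▸ isBd_le_mxb ht)
      set d := pvDescend l lps (l.getD i ' ') j (j + 1)
      have hdlt : d < i := by rw [← hql]; exact hd1.1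
      have hsnoc : l.take (i + 1) = l.take i ++ [l.getD i ' '] := by
        rw [List.take_add_one, List.getElem?_eq_getElem hi]
        simp [List.getD, List.getElem?_eq_getElem hi]
      have hmxnew : mxb (l.take (i + 1)) =
          if (l.take i).getD d ' ' = l.getD i ' ' then d + 1 else 0 := by
        rw [hsnoc]; exact mxb_snoc d hd1 hd2 hd3
      have hdchar : (l.take i).getD d ' ' = l.getD d ' ' := getD_take hdlt ' '
      show (if l.getD i ' ' = l.getD d ' ' then
              pvKmpGo l l.length (i + 1) (lps.set i (d + 1)) (d + 1)
            else pvKmpGo l l.length (i + 1) lps d).getD m 0 = _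
      by_cases hc : l.getD i ' ' = l.getD d ' '
      · rw [if_pos hc]
        have hmx : mxb (l.take (i + 1)) = d + 1 := by
          rw [hmxnew, if_pos (by rw [hdchar]; exact hc.symm)]
        refine ihf (i + 1) (lps.set i (d + 1)) (d + 1) (by omega) (by omega) (by omega)
          (by simp [hlen]) ?_ ?_ hmx.symm m hm
        · intro m' hm'
          rcases Nat.lt_or_ge m' i with h | h
          · rw [getD_set_ne (by omega)]; exact hinv m' h
          · rw [show m' = i by omega, getD_set_self (by omega), hmx]
        · intro m' hm'
          rw [getD_set_ne (by omega)]
          exact hzero m' (by omega)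
      · rw [if_neg hc]
        have hd0 : d = 0 := by
          rcases hd2 with h | h
          · exact h
          · exact absurd (hdchar ▸ h).symm hc
        have hmx : mxb (l.take (i + 1)) = 0 := by
          rw [hmxnew, if_neg (by rw [hdchar]; intro h; exact hc h.symm)]
        refine ihf (i + 1) lps d (by omega) (by omega) (by omega) hlen ?_ ?_
          (by rw [hd0, hmx]) m hm
        · intro m' hm'
          rcases Nat.lt_or_ge m' i with h | h
          · exact hinv m' h
          · rw [show m' = i by omega, hzero i (le_refl i), hmx]
        · intro m' hm'
          exact hzero m' (by omega)
    · rw [pvKmpGo, dif_neg hi]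
      exact hinv m (by omega)

theorem kmpGo_length (l : List Char) :
    ∀ fuel i lps j, l.length - i ≤ fuel →
      (pvKmpGo l l.length i lps j).length = lps.length := by
  intro fuel
  induction fuel with
  | zero =>
    intro i lps j hf
    rw [pvKmpGo, dif_neg (by omega)]
  | succ f ihf =>
    intro i lps j hf
    by_cases hi : i < l.length
    · rw [pvKmpGo, dif_pos hi]
      show (if l.getD i ' ' = l.getD (pvDescend l lps (l.getD i ' ') j (j + 1)) ' '
            then pvKmpGo l l.length (i + 1)
                   (lps.set i (pvDescend l lps (l.getD i ' ') j (j + 1) + 1))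
                   (pvDescend l lps (l.getD i ' ') j (j + 1) + 1)
            else pvKmpGo l l.length (i + 1) lps
                   (pvDescend l lps (l.getD i ' ') j (j + 1))).length = lps.length
      split
      · rw [ihf (i + 1) _ _ (by omega)]; simp
      · exact ihf (i + 1) _ _ (by omega)
    · rw [pvKmpGo, dif_neg hi]

-- ===== VERDICT (by name: the statement is the Claim_ definition above) =====
theorem find_minimal_task_name_spec : Claim_equal_find_minimal_task_name := by
  intro s k _ hpre
  unfold Spec_find_minimal_task_name find_minimal_task_name find_minimal_task_name_alt
  simp only []
  have hs : s ≠ "" := hpre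
  have hne : s.toList ≠ [] := by simp [String.toList_eq_nil_iff, hs]
  have hn : 1 ≤ s.toList.length := List.length_pos_of_ne_nil hne
  have key : (PySem.List.pyGet?
      (pvKmpGo s.toList s.toList.length 1 (List.replicate s.toList.length 0) 0) (-1)).getD 0
      = pvBScan s.toList s.toList.length (s.toList.length - 1) := by
    have hlen := kmpGo_length s.toList s.toList.length 1 (List.replicate s.toList.length 0) 0
      (by omega)
    rw [List.length_replicate] at hlen
    have htake1 : (s.toList.take 1).length = 1 := by rw [List.length_take]; omega
    have hmx1 : mxb (s.toList.take 1) = 0 := by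
      unfold mxb
      rw [htake1]
      norm_num [pvBScan]
    have hspec := kmpGo_spec s.toList s.toList.length 1 (List.replicate s.toList.length 0) 0
      (by omega) (le_refl 1) hn (by simp)
      (by intro m hm; rw [show m = 0 by omega]; simp [List.getD, hmx1])
      (by intro m _; simp [List.getD])
      hmx1.symm (s.toList.length - 1) (by omega)
    rw [show s.toList.length - 1 + 1 = s.toList.length by omega, List.take_length] at hspec
    rw [PySem.List.pyGet?_neg_one, List.getLast?_eq_getElem?, hlen]
    show (pvKmpGo s.toList s.toList.length 1 (List.replicate s.toList.length 0) 0).getD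
        (s.toList.length - 1) 0 = _
    rw [hspec]
    rfl
  rw [key]
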